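-- pv_equiv track=rewrite | github.com/supplementrobot/supplementnips | generate_rgb_for_lidar_adafusion.py | find_cross_over
-- ===== SOURCE A (Python) =====
-- def find_cross_over(arr, low, high, x):
--     if arr[high] <= x:  # x is greater than all
--         return high
--
--     if arr[low] > x:  # x is smaller than all
--         return low
--
--     # Find the middle point
--     mid = (low + high) // 2  # low + (high - low)// 2
--
--     # If x is same as middle element, then return mid
--     if arr[mid] <= x and arr[mid + 1] > x:
--         return mid
--
--     # If x is greater than arr[mid], then either arr[mid + 1] is ceiling of x or ceiling lies in arr[mid+1...high]
--     if arr[mid] < x: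
--         return find_cross_over(arr, mid + 1, high, x)
--
--     return find_cross_over(arr, low, mid - 1, x)
-- ===== SOURCE B (Python) =====
-- def find_cross_over(arr, low, high, x):
--     if arr[high] <= x:  # x is greater than all
--         return high
--     if arr[low] > x:  # x is smaller than all
--         return low
--     # linear scan: advance i while the next element is still <= x
--     i = low
--     while arr[i + 1] <= x:
--         i += 1
--     return i
-- ===== Notes on version B (the rewrite author's own statement) =====
-- stated objective: simpler
-- what changed: Replaces the recursive binary search (probing arr[mid]/arr[mid+1] and recursing on a halved range) with a plain linear scan that, after the two guard checks, advances an index while arr[i+1] <= x and returns it.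
-- outside the precondition, e.g. on find_cross_over([5, 5, 5, 9], 0, 3, 5): A returns 0, B returns 2
import Mathlib
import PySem

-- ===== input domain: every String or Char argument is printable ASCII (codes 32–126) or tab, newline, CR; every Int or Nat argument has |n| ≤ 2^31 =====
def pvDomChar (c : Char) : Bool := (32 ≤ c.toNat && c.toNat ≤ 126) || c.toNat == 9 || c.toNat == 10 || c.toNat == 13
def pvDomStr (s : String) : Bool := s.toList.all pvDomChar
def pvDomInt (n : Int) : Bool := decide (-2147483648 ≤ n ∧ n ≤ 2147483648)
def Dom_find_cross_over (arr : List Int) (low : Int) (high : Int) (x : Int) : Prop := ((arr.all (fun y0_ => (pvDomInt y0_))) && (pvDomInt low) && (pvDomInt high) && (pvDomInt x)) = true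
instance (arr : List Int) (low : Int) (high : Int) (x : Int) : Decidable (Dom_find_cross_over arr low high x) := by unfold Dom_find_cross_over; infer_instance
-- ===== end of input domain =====

-- B replaces A's recursive binary search with a plain linear scan after the two guard
-- checks: shorter, plainer code (it does more comparisons on long arrays).

-- ===== PORT A =====
-- shared index accessor: arr[i]; the .getD 0 default is unreachable under Pre_
def pvG (arr : List Int) (i : Int) : Int := (PySem.List.pyGet? arr i).getD 0

-- literal port of A's recursion; the fuel only makes it total (never exhausted under Pre_)
def find_cross_over_go (arr : List Int) (x : Int) : Nat → Int → Int → Int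
  | 0, _, _ => 0
  | fuel+1, low, high =>
    if pvG arr high ≤ x then high         -- x is greater than all
    else if pvG arr low > x then low      -- x is smaller than all
    else
      let mid := PySem.Int.floordiv (low + high) 2
      if pvG arr mid ≤ x ∧ pvG arr (mid + 1) > x then mid
      else if pvG arr mid < x then find_cross_over_go arr x fuel (mid + 1) high
      else find_cross_over_go arr x fuel low (mid - 1)

def find_cross_over (arr : List Int) (low : Int) (high : Int) (x : Int) : Int :=
  find_cross_over_go arr x ((high - low).toNat + 1) low high

-- ===== PORT B =====
-- B's scan loop 'while arr[i+1] <= x: i += 1'; fuel only makes it total (never exhausted under Pre_)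
def find_cross_over_alt_scan (arr : List Int) (x : Int) : Nat → Int → Int
  | 0, i => i
  | fuel+1, i => if pvG arr (i + 1) ≤ x then find_cross_over_alt_scan arr x fuel (i + 1) else i

def find_cross_over_alt (arr : List Int) (low : Int) (high : Int) (x : Int) : Int :=
  if pvG arr high ≤ x then high
  else if pvG arr low > x then low
  else find_cross_over_alt_scan arr x (high - low).toNat low

-- ===== PRECONDITION & SPEC =====
-- Pre_ admits strictly increasing arrays with in-range bounds, plus the two
-- immediate-return regions (x >= arr[high], or x below both arr[low] and arr[high])
-- with in-range (possibly negative, Python-wrapping) indices. It excludes inputs where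
-- A raises IndexError or recurses without bound, and the remaining unsorted or
-- duplicate-valued inputs, where A's returned index is an accidental tie of its probe
-- order that A and B break differently.
def Pre_find_cross_over (arr : List Int) (low : Int) (high : Int) (x : Int) : Prop :=
  (List.Pairwise (· < ·) arr ∧ 0 ≤ low ∧ low ≤ high ∧ high < (arr.length : Int))
  ∨ (-(arr.length : Int) ≤ high ∧ high < (arr.length : Int) ∧ pvG arr high ≤ x)
  ∨ (-(arr.length : Int) ≤ high ∧ high < (arr.length : Int) ∧
     -(arr.length : Int) ≤ low ∧ low < (arr.length : Int) ∧
     x < pvG arr high ∧ x < pvG arr low)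
instance (arr : List Int) (low : Int) (high : Int) (x : Int) : Decidable (Pre_find_cross_over arr low high x) := by unfold Pre_find_cross_over; infer_instance

def pvWitness_find_cross_over : List Int × Int × Int × Int := ([1, 3, 5], 0, 2, 2)

def Spec_find_cross_over (arr : List Int) (low : Int) (high : Int) (x : Int) (out : Int) : Prop := out = find_cross_over_alt arr low high x
instance (arr : List Int) (low : Int) (high : Int) (x : Int) (out : Int) : Decidable (Spec_find_cross_over arr low high x out) := by unfold Spec_find_cross_over; infer_instance

-- ===== CLAIM (what is proved, stated in full; the proofs are below) =====
def Claim_equal_find_cross_over : Prop := ∀ (arr : List Int) (low : Int) (high : Int) (x : Int), Dom_find_cross_over arr low high x → Pre_find_cross_over arr low high x → Spec_find_cross_over arr low high x (find_cross_over arr low high x)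

-- ===== LEMMAS AND PROOFS =====

theorem pvG_eq_getElem (arr : List Int) (i : Int) (h0 : 0 ≤ i) (h1 : i < (arr.length : Int)) :
    pvG arr i = arr[i.toNat]'(by omega) := by
  unfold pvG
  rw [PySem.List.pyGet?_of_nonneg arr h0]
  rw [List.getElem?_eq_getElem (by omega)]
  rfl

theorem pvG_mono (arr : List Int) (hs : List.Pairwise (· < ·) arr) (i j : Int)
    (h0 : 0 ≤ i) (hij : i < j) (hj : j < (arr.length : Int)) : pvG arr i < pvG arr j := by
  rw [pvG_eq_getElem arr i h0 (by omega), pvG_eq_getElem arr j (by omega) hj]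
  exact List.pairwise_iff_getElem.mp hs i.toNat j.toNat (by omega) (by omega) (by omega)

theorem pvG_mono_le (arr : List Int) (hs : List.Pairwise (· < ·) arr) (i j : Int)
    (h0 : 0 ≤ i) (hij : i ≤ j) (hj : j < (arr.length : Int)) : pvG arr i ≤ pvG arr j := by
  rcases lt_or_eq_of_le hij with h | h
  · exact le_of_lt (pvG_mono arr hs i j h0 h hj)
  · rw [h]

-- characterisation: under strict sortedness, indices ≤ c are exactly those with value ≤ x
theorem pvG_char (arr : List Int) (x : Int) (hs : List.Pairwise (· < ·) arr) (c : Int)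
    (hc0 : 0 ≤ c) (hc1 : c + 1 < (arr.length : Int))
    (hcx : pvG arr c ≤ x) (hcx2 : x < pvG arr (c + 1))
    (i : Int) (hi0 : 0 ≤ i) (hi1 : i < (arr.length : Int)) :
    pvG arr i ≤ x ↔ i ≤ c := by
  constructor
  · intro h
    by_contra hlt
    push Not at hlt
    have : pvG arr (c + 1) ≤ pvG arr i := pvG_mono_le arr hs _ _ (by omega) (by omega) hi1
    omega
  · intro h
    exact le_trans (pvG_mono_le arr hs i c hi0 h (by omega)) hcx

-- discrete intermediate value: a crossover index exists in [low, high)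
theorem exists_crossover (arr : List Int) (x high : Int) (hh : high < (arr.length : Int))
    (hgh : x < pvG arr high) :
    ∀ (n : Nat) (low : Int), (high - low).toNat ≤ n → 0 ≤ low → low ≤ high → pvG arr low ≤ x →
      ∃ c, low ≤ c ∧ c < high ∧ pvG arr c ≤ x ∧ x < pvG arr (c + 1) := by
  intro n
  induction n with
  | zero =>
    intro low hn h0 hlh hl
    have : low = high := by omega
    subst this
    omega
  | succ n ih =>
    intro low hn h0 hlh hl
    have hne : low ≠ high := by intro e; subst e; omega
    by_cases h1 : x < pvG arr (low + 1)
    · exact ⟨low, le_refl _, by omega, hl, h1⟩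
    · push Not at h1
      obtain ⟨c, hc1, hc2, hc3, hc4⟩ := ih (low + 1) (by omega) (by omega) (by omega) h1
      exact ⟨c, by omega, hc2, hc3, hc4⟩

-- A's recursion computes the crossover index c
theorem go_eq (arr : List Int) (x : Int) (hs : List.Pairwise (· < ·) arr) (c : Int)
    (hc0 : 0 ≤ c) (hc1 : c + 1 < (arr.length : Int))
    (hcx : pvG arr c ≤ x) (hcx2 : x < pvG arr (c + 1)) :
    ∀ (fuel : Nat) (low high : Int), 0 ≤ low → low ≤ c → c ≤ high → high < (arr.length : Int) →
      (high - low).toNat < fuel → find_cross_over_go arr x fuel low high = c := by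
  intro fuel
  induction fuel with
  | zero => intro low high _ _ _ _ hf; omega
  | succ f ih =>
    intro low high h0 hlc hch hhl hf
    have hchar := pvG_char arr x hs c hc0 hc1 hcx hcx2
    simp only [find_cross_over_go]
    by_cases hH : pvG arr high ≤ x
    · rw [if_pos hH]
      have := (hchar high (by omega) hhl).mp hH
      omega
    · rw [if_neg hH]
      have hcH : c < high := by
        by_contra hc
        exact hH ((hchar high (by omega) hhl).mpr (by omega))
      have hL : ¬ pvG arr low > x := by
        have := (hchar low h0 (by omega)).mpr hlc
        omega
      rw [if_neg hL]
      have hmid : PySem.Int.floordiv (low + high) 2 = (low + high) / 2 :=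
        PySem.Int.floordiv_eq_ediv_of_pos (by omega)
      simp only [hmid]
      have hm1 : low ≤ (low + high) / 2 := by omega
      have hm2 : (low + high) / 2 < high := by omega
      set mid := (low + high) / 2 with hmdef
      by_cases h3 : pvG arr mid ≤ x ∧ pvG arr (mid + 1) > x
      · rw [if_pos h3]
        have ha := (hchar mid (by omega) (by omega)).mp h3.1
        have hb : ¬ (mid + 1 ≤ c) := by
          intro hle
          have := (hchar (mid + 1) (by omega) (by omega)).mpr hle
          omega
        omega
      · rw [if_neg h3]
        by_cases h4 : pvG arr mid < x
        · rw [if_pos h4]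
          have hmc : mid ≤ c := (hchar mid (by omega) (by omega)).mp (le_of_lt h4)
          have hne : mid ≠ c := by
            intro e
            exact h3 ⟨by rw [e]; exact hcx, by rw [e]; exact hcx2⟩
          exact ih (mid + 1) high (by omega) (by omega) hch hhl (by omega)
        · rw [if_neg h4]
          have hmc : c < mid := by
            by_contra hc
            push Not at hc
            have hx : pvG arr mid ≤ x := (hchar mid (by omega) (by omega)).mpr hc
            have heq : pvG arr mid = x := by omega
            rcases lt_or_eq_of_le hc with hlt | he
            · have := pvG_mono arr hs mid c (by omega) hlt (by omega)
              omega
            · exact h3 ⟨by rw [he]; exact hcx, by rw [he]; exact hcx2⟩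
          exact ih low (mid - 1) h0 hlc (by omega) (by omega) (by omega)

-- B's scan reaches the crossover index c
theorem scan_eq (arr : List Int) (x : Int) (hs : List.Pairwise (· < ·) arr) (c : Int)
    (hc0 : 0 ≤ c) (hc1 : c + 1 < (arr.length : Int))
    (hcx : pvG arr c ≤ x) (hcx2 : x < pvG arr (c + 1)) :
    ∀ (fuel : Nat) (i : Int), 0 ≤ i → i ≤ c → (c - i).toNat ≤ fuel →
      find_cross_over_alt_scan arr x fuel i = c := by
  intro fuel
  induction fuel with
  | zero => intro i _ _ hf; simp only [find_cross_over_alt_scan]; omega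
  | succ f ih =>
    intro i h0 hic hf
    have hchar := pvG_char arr x hs c hc0 hc1 hcx hcx2
    simp only [find_cross_over_alt_scan]
    by_cases hi : pvG arr (i + 1) ≤ x
    · rw [if_pos hi]
      have : i + 1 ≤ c := (hchar (i + 1) (by omega) (by omega)).mp hi
      exact ih (i + 1) (by omega) this (by omega)
    · rw [if_neg hi]
      rcases lt_or_eq_of_le hic with hlt | he
      · exact absurd ((hchar (i + 1) (by omega) (by omega)).mpr (by omega)) hi
      · exact he

-- ===== VERDICT (by name: the statement is the Claim_ definition above) =====
theorem find_cross_over_spec : Claim_equal_find_cross_over := by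
  intro arr low high x _ hpre
  rcases hpre with ⟨hs, h0, hlh, hhl⟩ | ⟨_, _, hgh⟩ | ⟨_, _, _, _, hgt, hlt⟩
  case inr.inl =>
    unfold Spec_find_cross_over find_cross_over find_cross_over_alt
    simp [find_cross_over_go, hgh]
  case inr.inr =>
    unfold Spec_find_cross_over find_cross_over find_cross_over_alt
    simp [find_cross_over_go, not_le.mpr hgt, hlt]
  unfold Spec_find_cross_over find_cross_over find_cross_over_alt
  by_cases hH : pvG arr high ≤ x
  · simp [find_cross_over_go, hH]
  · by_cases hL : pvG arr low > x
    · simp [find_cross_over_go, hH, hL]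
    · push Not at hH hL
      obtain ⟨c, hlc, hch, hcx, hcx2⟩ :=
        exists_crossover arr x high hhl hH ((high - low).toNat) low (le_refl _) h0 hlh hL
      have hc0 : 0 ≤ c := by omega
      have hc1 : c + 1 < (arr.length : Int) := by omega
      rw [go_eq arr x hs c hc0 hc1 hcx hcx2 _ low high h0 hlc (by omega) hhl (by omega)]
      rw [if_neg (by omega), if_neg (by omega)]
      rw [scan_eq arr x hs c hc0 hc1 hcx hcx2 _ low h0 hlc (by omega)]
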